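-- pv_equiv track=rewrite | github.com/stepan-o/enqueteur | backend/sim4/case_mbam/completion_flow.py | _continuity_flags_from_outcome_flags
-- ===== SOURCE A (Python) =====
-- from typing import Iterable, Literal, Mapping, cast
--
-- def _sorted_unique(values: Iterable[str]) -> tuple[str, ...]:
--     return tuple(sorted({v for v in values if isinstance(v, str) and v}))
--
-- def _continuity_flags_from_outcome_flags(flags: Iterable[str]) -> tuple[str, ...]:
--     out: set[str] = set()
--     flag_set = set(_sorted_unique(flags))
--     out.update(flag for flag in flag_set if flag.startswith("continuity:"))
--     if "item_leaves_building" in flag_set or "outcome:item_left_building" in flag_set: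
--         out.add("continuity:item_left_building")
--     if "relationship_penalty_future_case" in flag_set:
--         out.add("continuity:relationship_penalty")
--     if "outcome:best_outcome_awarded" in flag_set:
--         out.add("continuity:mbam_best_outcome")
--     if "outcome:soft_fail_latched" in flag_set:
--         out.add("continuity:mbam_soft_fail")
--     return tuple(sorted(out))
-- ===== SOURCE B (Python) =====
-- # Sort-and-merge reformulation: produce the two sorted streams (continuity-prefixed
-- # input flags, and rule targets in sorted order), then two-pointer merge + adjacent
-- # dedup build the sorted unique output directly, with no set and no final sort.
--
-- _RULES = (
--     ("continuity:item_left_building", ("item_leaves_building", "outcome:item_left_building")),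
--     ("continuity:mbam_best_outcome", ("outcome:best_outcome_awarded",)),
--     ("continuity:mbam_soft_fail", ("outcome:soft_fail_latched",)),
--     ("continuity:relationship_penalty", ("relationship_penalty_future_case",)),
-- )
--
--
-- def _merge(xs, ys):
--     out = []
--     i = j = 0
--     while i < len(xs) and j < len(ys):
--         if xs[i] <= ys[j]:
--             out.append(xs[i])
--             i += 1
--         else:
--             out.append(ys[j])
--             j += 1
--     out.extend(xs[i:])
--     out.extend(ys[j:])
--     return out
--
--
-- def _dedup_adjacent(xs):
--     out = []
--     prev = None
--     for x in xs:
--         if x != prev: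
--             out.append(x)
--             prev = x
--     return out
--
--
-- def _continuity_flags_from_outcome_flags(flags):
--     present = sorted(f for f in flags if isinstance(f, str))
--     direct = [f for f in present if f.startswith("continuity:")]   # sorted
--     derived = [tgt for tgt, srcs in _RULES if any(s in present for s in srcs)]  # sorted
--     return tuple(_dedup_adjacent(_merge(direct, derived)))
-- ===== Notes on version B (the rewrite author's own statement) =====
-- stated objective: alternative
-- what changed: Replaces A's set pipeline (dedupe into a set, a four-way if-chain of membership tests adding into the set, then a final sort of the set) by a sort-and-merge construction: the continuity-prefixed flags are taken from the sorted input as one sorted stream, the fired rule targets form a second sorted stream, and a two-pointer merge with adjacent deduplication builds the sorted unique output directly, with no set and no final sort.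
import Mathlib
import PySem

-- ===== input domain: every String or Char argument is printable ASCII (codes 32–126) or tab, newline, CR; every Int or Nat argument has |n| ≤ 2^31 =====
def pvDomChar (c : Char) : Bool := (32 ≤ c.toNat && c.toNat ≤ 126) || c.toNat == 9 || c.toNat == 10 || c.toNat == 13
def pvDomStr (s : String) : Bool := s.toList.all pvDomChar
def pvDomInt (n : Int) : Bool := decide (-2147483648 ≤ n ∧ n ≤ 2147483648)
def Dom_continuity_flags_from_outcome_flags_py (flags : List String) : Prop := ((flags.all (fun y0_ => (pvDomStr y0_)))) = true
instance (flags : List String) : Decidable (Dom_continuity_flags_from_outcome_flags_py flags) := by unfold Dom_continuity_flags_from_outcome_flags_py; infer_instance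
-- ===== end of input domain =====

-- B replaces A's set pipeline (dedupe, if-chain of membership tests, final sort of a set) by a sort-and-merge construction: two sorted streams (continuity-prefixed flags; fired rule targets) are two-pointer merged and adjacent-deduped, building the sorted unique output directly with no set and no final sort.


-- ===== PORT A =====
-- _sorted_unique(values): tuple(sorted({v for v in values if isinstance(v, str) and v}))
-- (every element is a String under the type convention, so the isinstance test is identically true)
def sorted_unique_py (values : List String) : List String :=
  PySem.List.sorted (PySem.Set.ofList (values.filter (fun v => v ≠ ""))) (fun x => x) false

def continuity_flags_from_outcome_flags_py (flags : List String) : List String :=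
  let out0 : PySem.Set String := PySem.Set.empty
  let flag_set : PySem.Set String := PySem.Set.ofList (sorted_unique_py flags)
  -- out.update(flag for flag in flag_set if flag.startswith("continuity:"))
  let out1 := PySem.Set.update out0 (flag_set.filter (fun f => PySem.Str.startswith f "continuity:"))
  let out2 := if PySem.Set.contains flag_set "item_leaves_building" || PySem.Set.contains flag_set "outcome:item_left_building"
              then PySem.Set.add out1 "continuity:item_left_building" else out1
  let out3 := if PySem.Set.contains flag_set "relationship_penalty_future_case"
              then PySem.Set.add out2 "continuity:relationship_penalty" else out2
  let out4 := if PySem.Set.contains flag_set "outcome:best_outcome_awarded"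
              then PySem.Set.add out3 "continuity:mbam_best_outcome" else out3
  let out5 := if PySem.Set.contains flag_set "outcome:soft_fail_latched"
              then PySem.Set.add out4 "continuity:mbam_soft_fail" else out4
  PySem.List.sorted out5 (fun x => x) false

-- ===== PORT B =====
-- _RULES: targets listed in sorted order, each with its trigger flags
def pvRules : List (String × List String) :=
  [ ("continuity:item_left_building", ["item_leaves_building", "outcome:item_left_building"])
  , ("continuity:mbam_best_outcome", ["outcome:best_outcome_awarded"])
  , ("continuity:mbam_soft_fail", ["outcome:soft_fail_latched"])
  , ("continuity:relationship_penalty", ["relationship_penalty_future_case"]) ]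

-- _merge: the two-pointer while loop, as the obvious structural recursion on the two lists
def pvMerge : List String → List String → List String
  | [], ys => ys
  | x :: xs, [] => x :: xs
  | x :: xs, y :: ys =>
      if x ≤ y then x :: pvMerge xs (y :: ys) else y :: pvMerge (x :: xs) ys

-- _dedup_adjacent: the for loop with its 'prev' variable as a recursion parameter
def pvDedupAdj : List String → Option String → List String
  | [], _ => []
  | x :: rest, prev =>
      if some x = prev then pvDedupAdj rest prev else x :: pvDedupAdj rest (some x)

def continuity_flags_from_outcome_flags_py_alt (flags : List String) : List String :=
  -- present = sorted(f for f in flags if isinstance(f, str))  (isinstance identically true)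
  let present := PySem.List.sorted flags (fun x => x) false
  let direct := present.filter (fun f => PySem.Str.startswith f "continuity:")
  let derived := (pvRules.filter (fun r => r.2.any (fun s => present.contains s))).map Prod.fst
  pvDedupAdj (pvMerge direct derived) none

-- ===== PRECONDITION & SPEC =====
def Spec_continuity_flags_from_outcome_flags_py (flags : List String) (out : List String) : Prop := out = continuity_flags_from_outcome_flags_py_alt flags
instance (flags : List String) (out : List String) : Decidable (Spec_continuity_flags_from_outcome_flags_py flags out) := by unfold Spec_continuity_flags_from_outcome_flags_py; infer_instance

-- ===== CLAIM (what is proved, stated in full; the proofs are below) =====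
def Claim_equal_continuity_flags_from_outcome_flags_py : Prop := ∀ (flags : List String), Dom_continuity_flags_from_outcome_flags_py flags → Spec_continuity_flags_from_outcome_flags_py flags (continuity_flags_from_outcome_flags_py flags)

-- ===== LEMMAS AND PROOFS =====

-- the common membership characterisation of both result lists
def pvP (flags : List String) (x : String) : Prop :=
  (x ∈ flags ∧ PySem.Str.startswith x "continuity:" = true)
  ∨ (x = "continuity:item_left_building" ∧ ("item_leaves_building" ∈ flags ∨ "outcome:item_left_building" ∈ flags))
  ∨ (x = "continuity:relationship_penalty" ∧ "relationship_penalty_future_case" ∈ flags)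
  ∨ (x = "continuity:mbam_best_outcome" ∧ "outcome:best_outcome_awarded" ∈ flags)
  ∨ (x = "continuity:mbam_soft_fail" ∧ "outcome:soft_fail_latched" ∈ flags)

lemma startswith_ne_empty (x : String) (h : PySem.Str.startswith x "continuity:" = true) : x ≠ "" := by
  intro he; subst he; simp [PySem.Str.startswith, PySem.Chars.startswith] at h

lemma mem_cond_add (b : Bool) (s : PySem.Set String) (v x : String) :
    (x ∈ (if b = true then PySem.Set.add s v else s)) ↔ x ∈ s ∨ (x = v ∧ b = true) := by
  cases b <;> simp [PySem.Set.mem_add]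

lemma mem_sorted_unique (flags : List String) (x : String) :
    x ∈ sorted_unique_py flags ↔ x ∈ flags ∧ x ≠ "" := by
  simp [sorted_unique_py, PySem.Set.mem_ofList, PySem.List.mem_sorted, List.mem_filter]

lemma memA (flags : List String) (x : String) :
    x ∈ continuity_flags_from_outcome_flags_py flags ↔ pvP flags x := by
  unfold continuity_flags_from_outcome_flags_py pvP
  simp only [PySem.List.mem_sorted]
  rw [mem_cond_add, mem_cond_add, mem_cond_add, mem_cond_add]
  simp only [PySem.Set.update_empty, PySem.Set.mem_ofList, List.mem_filter, Bool.or_eq_true,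
    PySem.Set.contains_iff, mem_sorted_unique, ne_eq, String.reduceEq, not_false_eq_true, and_true]
  have hne := startswith_ne_empty x
  constructor
  · rintro ((⟨⟨h1, _⟩, h3⟩ | h) | h | h | h) <;> tauto
  · rintro (⟨h1, h2⟩ | h | h | h | h)
    · exact Or.inl (Or.inl (Or.inl (Or.inl ⟨⟨h1, hne h2⟩, h2⟩)))
    all_goals tauto

lemma nodup_cond_add (b : Bool) (s : PySem.Set String) (v : String) (hs : s.Nodup) :
    (if b = true then PySem.Set.add s v else s).Nodup := by
  cases b
  · simpa using hs
  · simpa using PySem.Set.nodup_add s v hs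

lemma nodup_sorted_of_nodup (l : List String) (h : l.Nodup) :
    (PySem.List.sorted l (fun x => x) false).Nodup :=
  ((PySem.List.sorted_perm l (fun x => x) false).nodup_iff).mpr h

lemma nodupA (flags : List String) : (continuity_flags_from_outcome_flags_py flags).Nodup := by
  unfold continuity_flags_from_outcome_flags_py
  apply nodup_sorted_of_nodup
  apply nodup_cond_add; apply nodup_cond_add; apply nodup_cond_add; apply nodup_cond_add
  rw [PySem.Set.update_empty]
  exact PySem.Set.nodup_ofList _

lemma pairwiseA (flags : List String) :
    (continuity_flags_from_outcome_flags_py flags).Pairwise (· ≤ ·) :=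
  PySem.List.sorted_pairwise _ _

-- ---- B side ----

lemma mem_pvMerge (xs ys : List String) (x : String) :
    x ∈ pvMerge xs ys ↔ x ∈ xs ∨ x ∈ ys := by
  induction xs, ys using pvMerge.induct with
  | case1 ys => simp [pvMerge]
  | case2 x xs => simp [pvMerge]
  | case3 a as b bs h ih => simp only [pvMerge, if_pos h, List.mem_cons, ih]; tauto
  | case4 a as b bs h ih => simp only [pvMerge, if_neg h, List.mem_cons, ih]; tauto

lemma pairwise_pvMerge (xs ys : List String)
    (hx : xs.Pairwise (· ≤ ·)) (hy : ys.Pairwise (· ≤ ·)) :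
    (pvMerge xs ys).Pairwise (· ≤ ·) := by
  induction xs, ys using pvMerge.induct with
  | case1 ys => simpa [pvMerge] using hy
  | case2 x xs => simpa [pvMerge] using hx
  | case3 a as b bs h ih =>
    rw [List.pairwise_cons] at hx
    simp only [pvMerge, if_pos h]
    refine List.Pairwise.cons ?_ (ih hx.2 hy)
    intro z hz
    rcases (mem_pvMerge _ _ _).mp hz with hz | hz
    · exact hx.1 z hz
    · rcases List.mem_cons.mp hz with rfl | hz
      · exact h
      · exact le_trans h ((List.pairwise_cons.mp hy).1 z hz)
  | case4 a as b bs h ih =>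
    rw [List.pairwise_cons] at hy
    have hba : b ≤ a := le_of_not_ge h
    simp only [pvMerge, if_neg h]
    refine List.Pairwise.cons ?_ (ih hx hy.2)
    intro z hz
    rcases (mem_pvMerge _ _ _).mp hz with hz | hz
    · rcases List.mem_cons.mp hz with rfl | hz
      · exact hba
      · exact le_trans hba ((List.pairwise_cons.mp hx).1 z hz)
    · exact hy.1 z hz

lemma pvDedupAdj_cons (a : String) (rest : List String) (prev : Option String) :
    pvDedupAdj (a :: rest) prev
      = if some a = prev then pvDedupAdj rest prev else a :: pvDedupAdj rest (some a) := rfl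

lemma mem_pvDedupAdj (l : List String) (prev : Option String) (x : String)
    (hs : l.Pairwise (· ≤ ·)) (hb : ∀ p, prev = some p → ∀ z ∈ l, p ≤ z) :
    x ∈ pvDedupAdj l prev ↔ x ∈ l ∧ prev ≠ some x := by
  induction l generalizing prev with
  | nil => simp [pvDedupAdj]
  | cons a rest ih =>
    rw [List.pairwise_cons] at hs
    by_cases hp : some a = prev
    · subst hp
      rw [pvDedupAdj_cons, if_pos rfl]
      rw [ih _ hs.2 (by intro p hp z hz; injection hp with hp; subst hp; exact hs.1 z hz)]
      constructor
      · rintro ⟨h1, h2⟩; exact ⟨List.mem_cons_of_mem _ h1, h2⟩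
      · rintro ⟨h1, h2⟩
        rcases List.mem_cons.mp h1 with rfl | h1
        · exact absurd rfl h2
        · exact ⟨h1, h2⟩
    · rw [pvDedupAdj_cons, if_neg hp]
      simp only [List.mem_cons]
      rw [ih _ hs.2 (by intro p hp z hz; injection hp with hp; subst hp; exact hs.1 z hz)]
      constructor
      · rintro (rfl | ⟨h1, h2⟩)
        · exact ⟨Or.inl rfl, fun h => hp h.symm⟩
        · refine ⟨Or.inr h1, ?_⟩
          rintro heq
          have hxa : x ≤ a := hb x heq a (List.mem_cons_self ..)
          have hax : a ≤ x := hs.1 x h1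
          exact h2 (by rw [le_antisymm hax hxa])
      · rintro ⟨h1, h2⟩
        rcases h1 with rfl | h1
        · exact Or.inl rfl
        · by_cases hax : x = a
          · exact Or.inl hax
          · exact Or.inr ⟨h1, by simpa using fun he => hax he.symm⟩

lemma pairwise_lt_pvDedupAdj (l : List String) (prev : Option String)
    (hs : l.Pairwise (· ≤ ·)) (hb : ∀ p, prev = some p → ∀ z ∈ l, p ≤ z) :
    (pvDedupAdj l prev).Pairwise (· < ·) := by
  induction l generalizing prev with
  | nil => simp [pvDedupAdj]
  | cons a rest ih =>
    rw [List.pairwise_cons] at hs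
    by_cases hp : some a = prev
    · rw [pvDedupAdj_cons, if_pos hp]
      exact ih _ hs.2 (by subst hp; intro p hp z hz; injection hp with hp; subst hp; exact hs.1 z hz)
    · rw [pvDedupAdj_cons, if_neg hp]
      refine List.Pairwise.cons ?_ (ih _ hs.2 (by intro p hp z hz; injection hp with hp; subst hp; exact hs.1 z hz))
      intro z hz
      have hm := (mem_pvDedupAdj rest (some a) z hs.2
        (by intro p hp w hw; injection hp with hp; subst hp; exact hs.1 w hw)).mp hz
      exact lt_of_le_of_ne (hs.1 z hm.1) (by intro he; exact hm.2 (by rw [he]))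

lemma mem_direct (flags : List String) (x : String) :
    x ∈ (PySem.List.sorted flags (fun x => x) false).filter
          (fun f => PySem.Str.startswith f "continuity:")
      ↔ x ∈ flags ∧ PySem.Str.startswith x "continuity:" = true := by
  simp [List.mem_filter, PySem.List.mem_sorted]

lemma pairwise_direct (flags : List String) :
    ((PySem.List.sorted flags (fun x => x) false).filter
        (fun f => PySem.Str.startswith f "continuity:")).Pairwise (· ≤ ·) :=
  (PySem.List.sorted_pairwise flags (fun x => x)).filter _

lemma mem_derived (flags : List String) (x : String) :
    x ∈ ((pvRules.filter
            (fun r => r.2.any (fun s => (PySem.List.sorted flags (fun x => x) false).contains s))).map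
          Prod.fst)
      ↔ (x = "continuity:item_left_building" ∧ ("item_leaves_building" ∈ flags ∨ "outcome:item_left_building" ∈ flags))
        ∨ (x = "continuity:mbam_best_outcome" ∧ "outcome:best_outcome_awarded" ∈ flags)
        ∨ (x = "continuity:mbam_soft_fail" ∧ "outcome:soft_fail_latched" ∈ flags)
        ∨ (x = "continuity:relationship_penalty" ∧ "relationship_penalty_future_case" ∈ flags) := by
  simp only [List.mem_map, List.mem_filter]
  constructor
  · rintro ⟨r, ⟨hr, hc⟩, rfl⟩
    fin_cases hr <;>
      simp_all [PySem.List.mem_sorted]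
  · intro h
    rcases h with ⟨rfl, h⟩ | ⟨rfl, h⟩ | ⟨rfl, h⟩ | ⟨rfl, h⟩
    · exact ⟨("continuity:item_left_building", ["item_leaves_building", "outcome:item_left_building"]),
        ⟨by simp [pvRules], by simp [PySem.List.mem_sorted]; tauto⟩, rfl⟩
    · exact ⟨("continuity:mbam_best_outcome", ["outcome:best_outcome_awarded"]),
        ⟨by simp [pvRules], by simp [PySem.List.mem_sorted]; tauto⟩, rfl⟩
    · exact ⟨("continuity:mbam_soft_fail", ["outcome:soft_fail_latched"]),
        ⟨by simp [pvRules], by simp [PySem.List.mem_sorted]; tauto⟩, rfl⟩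
    · exact ⟨("continuity:relationship_penalty", ["relationship_penalty_future_case"]),
        ⟨by simp [pvRules], by simp [PySem.List.mem_sorted]; tauto⟩, rfl⟩

lemma pairwise_derived (flags : List String) :
    (((pvRules.filter
          (fun r => r.2.any (fun s => (PySem.List.sorted flags (fun x => x) false).contains s))).map
        Prod.fst)).Pairwise (· ≤ ·) := by
  have h : pvRules.Pairwise (fun a b => a.1 ≤ b.1) := by
    simp only [pvRules, List.pairwise_cons, List.mem_cons, List.not_mem_nil]
    refine ⟨?_, ?_, ?_, ?_⟩ <;>
      try (intro b hb; rcases hb with rfl | rfl | rfl | h <;>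
        first | (rw [String.le_iff_toList_le]; decide) | cases h)
    all_goals simp [List.Pairwise.nil]
  exact (h.sublist List.filter_sublist).map _ (fun a b hab => hab)

lemma pairwise_merged (flags : List String) :
    (pvMerge
      ((PySem.List.sorted flags (fun x => x) false).filter
        (fun f => PySem.Str.startswith f "continuity:"))
      ((pvRules.filter
          (fun r => r.2.any (fun s => (PySem.List.sorted flags (fun x => x) false).contains s))).map
        Prod.fst)).Pairwise (· ≤ ·) :=
  pairwise_pvMerge _ _ (pairwise_direct flags) (pairwise_derived flags)

lemma memB (flags : List String) (x : String) :
    x ∈ continuity_flags_from_outcome_flags_py_alt flags ↔ pvP flags x := by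
  unfold continuity_flags_from_outcome_flags_py_alt
  rw [mem_pvDedupAdj _ _ _ (pairwise_merged flags) (by rintro p h; cases h)]
  simp only [ne_eq, reduceCtorEq, not_false_eq_true, and_true]
  rw [mem_pvMerge, mem_direct, mem_derived]
  unfold pvP
  tauto

lemma pairwise_lt_B (flags : List String) :
    (continuity_flags_from_outcome_flags_py_alt flags).Pairwise (· < ·) := by
  unfold continuity_flags_from_outcome_flags_py_alt
  exact pairwise_lt_pvDedupAdj _ _ (pairwise_merged flags) (by rintro p h; cases h)

-- ===== VERDICT (by name: the statement is the Claim_ definition above) =====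
theorem continuity_flags_from_outcome_flags_py_spec : Claim_equal_continuity_flags_from_outcome_flags_py := by
  intro flags _
  unfold Spec_continuity_flags_from_outcome_flags_py
  have hnB : (continuity_flags_from_outcome_flags_py_alt flags).Nodup :=
    (pairwise_lt_B flags).imp ne_of_lt
  have hperm : (continuity_flags_from_outcome_flags_py flags).Perm
      (continuity_flags_from_outcome_flags_py_alt flags) :=
    (List.perm_ext_iff_of_nodup (nodupA flags) hnB).mpr
      (fun x => (memA flags x).trans (memB flags x).symm)
  exact List.Perm.eq_of_pairwise' (pairwiseA flags) ((pairwise_lt_B flags).imp le_of_lt) hperm
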